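-- pv_equiv track=rewrite | github.com/chaojiang06/arXivEdits | code/edits/extract_edits.py | char_offsets_from_diff_v1
-- ===== SOURCE A (Python) =====
-- def char_offsets_from_diff_v1(diff):
--     """Find character offsets for each diff."""
--     char_offset1, char_offset2 = 0, 0
--     char_mappings = []
--
--     for operation, segment in diff:
--         segment_length = len(segment)
--         if operation == 0:  # No change
--             char_offset1 += segment_length
--             char_offset2 += segment_length
--         elif operation == -1:  # Deletion from sent1
--             char_mappings.append(
--                 ('deletion', char_offset1, char_offset1 + segment_length))
--             char_offset1 += segment_length
--         elif operation == 1:  # Insertion in sent2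
--             char_mappings.append(
--                 ('insertion', char_offset2, char_offset2 + segment_length))
--             char_offset2 += segment_length
--
--     return char_mappings
-- ===== SOURCE B (Python) =====
-- def char_offsets_from_diff_v1(diff):
--     """Find character offsets for each diff (two-pass: precompute starts, then select)."""
--     starts = []
--     t1 = t2 = 0
--     for op, seg in diff:
--         starts.append((t1, t2))
--         if op in (0, -1):
--             t1 += len(seg)
--         if op in (0, 1):
--             t2 += len(seg)
--     out = []
--     for (op, seg), (s1, s2) in zip(diff, starts):
--         if op == -1:
--             out.append(('deletion', s1, s1 + len(seg)))
--         elif op == 1: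
--             out.append(('insertion', s2, s2 + len(seg)))
--     return out
-- ===== Notes on version B (the rewrite author's own statement) =====
-- stated objective: alternative
-- what changed: Replaced the single interleaved stateful loop with a precompute pass building a table of (start1, start2) offsets for every entry, followed by a selection pass over diff zipped with that table emitting deletion/insertion spans.
import Mathlib
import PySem

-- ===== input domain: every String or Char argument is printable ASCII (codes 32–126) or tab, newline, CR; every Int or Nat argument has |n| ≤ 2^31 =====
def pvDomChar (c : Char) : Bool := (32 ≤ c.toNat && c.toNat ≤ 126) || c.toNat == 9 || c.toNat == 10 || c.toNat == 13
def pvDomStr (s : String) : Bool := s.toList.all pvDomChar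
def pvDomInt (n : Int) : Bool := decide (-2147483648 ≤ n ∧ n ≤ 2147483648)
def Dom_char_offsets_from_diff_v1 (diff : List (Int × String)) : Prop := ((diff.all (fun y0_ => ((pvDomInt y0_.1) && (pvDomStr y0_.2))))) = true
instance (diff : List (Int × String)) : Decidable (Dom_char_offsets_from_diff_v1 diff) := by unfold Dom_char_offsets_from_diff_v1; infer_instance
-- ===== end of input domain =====

-- B replaces A's single interleaved stateful loop by a precompute pass building a
-- table of per-entry (start1, start2) offsets plus a selection pass over the zip
-- (objective: alternative decomposition, same O(n) cost).

-- ===== PORT A =====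
-- the loop body of A, then a single fold over (char_offset1, char_offset2, char_mappings)
def pvStepA (st : Int × Int × List (String × Int × Int)) (p : Int × String) :
    Int × Int × List (String × Int × Int) :=
  let c1 := st.1; let c2 := st.2.1; let m := st.2.2
  let L : Int := PySem.Str.len p.2
  if p.1 == 0 then (c1 + L, c2 + L, m)
  else if p.1 == -1 then (c1 + L, c2, m ++ [("deletion", c1, c1 + L)])
  else if p.1 == 1 then (c1, c2 + L, m ++ [("insertion", c2, c2 + L)])
  else (c1, c2, m)

def char_offsets_from_diff_v1 (diff : List (Int × String)) : List (String × Int × Int) :=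
  (diff.foldl pvStepA (0, 0, [])).2.2

-- ===== PORT B =====
-- first pass of Source B: the table of (t1, t2) starts for each entry
def pvStarts (diff : List (Int × String)) (t1 t2 : Int) : List (Int × Int) :=
  match diff with
  | [] => []
  | (op, seg) :: rest =>
      let L : Int := PySem.Str.len seg
      (t1, t2) :: pvStarts rest (if op == 0 || op == -1 then t1 + L else t1)
                                (if op == 0 || op == 1 then t2 + L else t2)

-- the body of Source B's second (selection) loop
def pvSelB (q : (Int × String) × Int × Int) : Option (String × Int × Int) :=
  let op := q.1.1; let seg := q.1.2; let s1 := q.2.1; let s2 := q.2.2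
  if op == -1 then some ("deletion", s1, s1 + PySem.Str.len seg)
  else if op == 1 then some ("insertion", s2, s2 + PySem.Str.len seg)
  else none

-- second pass of Source B: selection over diff zipped with the starts table
def char_offsets_from_diff_v1_alt (diff : List (Int × String)) : List (String × Int × Int) :=
  (diff.zip (pvStarts diff 0 0)).filterMap pvSelB

-- ===== PRECONDITION & SPEC =====
def Spec_char_offsets_from_diff_v1 (diff : List (Int × String)) (out : List (String × Int × Int)) : Prop := out = char_offsets_from_diff_v1_alt diff
instance (diff : List (Int × String)) (out : List (String × Int × Int)) : Decidable (Spec_char_offsets_from_diff_v1 diff out) := by unfold Spec_char_offsets_from_diff_v1; infer_instance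

-- ===== CLAIM (what is proved, stated in full; the proofs are below) =====
def Claim_equal_char_offsets_from_diff_v1 : Prop := ∀ (diff : List (Int × String)), Dom_char_offsets_from_diff_v1 diff → Spec_char_offsets_from_diff_v1 diff (char_offsets_from_diff_v1 diff)

-- ===== LEMMAS AND PROOFS =====

-- A's fold from any state (c1, c2, m) equals m ++ B's two-pass result started at (c1, c2)
theorem pv_fold_eq (diff : List (Int × String)) (c1 c2 : Int) (m : List (String × Int × Int)) :
    (diff.foldl pvStepA (c1, c2, m)).2.2
      = m ++ (diff.zip (pvStarts diff c1 c2)).filterMap pvSelB := by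
  induction diff generalizing c1 c2 m with
  | nil => simp
  | cons p rest ih =>
    obtain ⟨op, seg⟩ := p
    rw [List.foldl_cons]
    by_cases h0 : op = 0
    · subst h0
      rw [show pvStepA (c1, c2, m) (0, seg) =
            (c1 + PySem.Str.len seg, c2 + PySem.Str.len seg, m) by simp [pvStepA]]
      rw [ih]
      simp [pvStarts, pvSelB]
    · by_cases hm1 : op = -1
      · subst hm1
        rw [show pvStepA (c1, c2, m) (-1, seg) =
              (c1 + PySem.Str.len seg, c2,
               m ++ [("deletion", c1, c1 + PySem.Str.len seg)]) by simp [pvStepA]]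
        rw [ih]
        simp [pvStarts, pvSelB]
      · by_cases h1 : op = 1
        · subst h1
          rw [show pvStepA (c1, c2, m) (1, seg) =
                (c1, c2 + PySem.Str.len seg,
                 m ++ [("insertion", c2, c2 + PySem.Str.len seg)]) by simp [pvStepA]]
          rw [ih]
          simp [pvStarts, pvSelB]
        · rw [show pvStepA (c1, c2, m) (op, seg) = (c1, c2, m) by
                simp [pvStepA, h0, hm1, h1]]
          rw [ih]
          simp [pvStarts, pvSelB, h0, hm1, h1]

-- ===== VERDICT (by name: the statement is the Claim_ definition above) =====
theorem char_offsets_from_diff_v1_spec : Claim_equal_char_offsets_from_diff_v1 := by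
  intro diff _
  unfold Spec_char_offsets_from_diff_v1 char_offsets_from_diff_v1 char_offsets_from_diff_v1_alt
  simpa using pv_fold_eq diff 0 0 []
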